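-- pv_equiv track=rewrite | github.com/morsznetik/unicode-ascii-tags | main.py | encode_ascii_to_unicode
-- ===== SOURCE A (Python) =====
-- ASCII_RANGE = range(0x20, 0x7F)  # Space (0x20) to Tilde (0x7E)
--
-- TAG_OFFSET = 0xE0000
--
-- def encode_ascii_to_unicode(text: str) -> str:
--     result: list[str] = []
--     for char in text:
--         code_point = ord(char)
--         if code_point in ASCII_RANGE:
--             tag_code_point = code_point + TAG_OFFSET
--             result.append(chr(tag_code_point))
--         else:
--             result.append(char)
--     return "".join(result)
-- ===== SOURCE B (Python) =====
-- TAG_OFFSET = 0xE0000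
--
-- def _enc_char(c: str) -> str:
--     cp = ord(c)
--     return chr(cp + TAG_OFFSET) if 0x20 <= cp < 0x7F else c
--
-- def encode_ascii_to_unicode(text: str) -> str:
--     # divide-and-conquer: recurse on the two halves, concatenate the results
--     n = len(text)
--     if n == 0:
--         return ""
--     if n == 1:
--         return _enc_char(text)
--     mid = n // 2
--     return encode_ascii_to_unicode(text[:mid]) + encode_ascii_to_unicode(text[mid:])
-- ===== Notes on version B (the rewrite author's own statement) =====
-- stated objective: alternative
-- what changed: Replaced A's linear loop appending per-character results to an accumulator list by a recursive divide-and-conquer that splits the string in half, encodes each half recursively and concatenates, with the per-character mapping only at the single-character base case.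
import Mathlib
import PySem

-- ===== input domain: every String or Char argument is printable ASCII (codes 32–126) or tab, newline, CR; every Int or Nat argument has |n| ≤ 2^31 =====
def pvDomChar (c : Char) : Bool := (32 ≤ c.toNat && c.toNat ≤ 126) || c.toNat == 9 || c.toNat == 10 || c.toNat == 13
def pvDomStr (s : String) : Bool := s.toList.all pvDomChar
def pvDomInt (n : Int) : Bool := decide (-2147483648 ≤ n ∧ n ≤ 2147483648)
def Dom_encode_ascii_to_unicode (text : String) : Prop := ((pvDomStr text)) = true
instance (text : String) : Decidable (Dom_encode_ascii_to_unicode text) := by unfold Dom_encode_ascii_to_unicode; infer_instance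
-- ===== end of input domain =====

-- B replaces A's linear accumulator loop by a recursive divide-and-conquer on string halves (alternative decomposition, no speed claim).


-- ===== PORT A =====
-- ASCII_RANGE = range(0x20, 0x7F); TAG_OFFSET = 0xE0000
-- loop appending chr(code_point + TAG_OFFSET) or the char itself, then "".join
def encode_ascii_to_unicode (text : String) : String :=
  let result : List Char :=
    text.toList.foldl (fun result char =>
      let code_point : Int := (char.toNat : Int)
      if 0x20 ≤ code_point ∧ code_point < 0x7F then
        let tag_code_point := code_point + 0xE0000
        result ++ [Char.ofNat tag_code_point.toNat]
      else
        result ++ [char]) []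
  String.mk result

-- ===== PORT B =====
-- _enc_char: chr(cp + TAG_OFFSET) if 0x20 <= cp < 0x7F else c
def pvEncChar (c : Char) : Char :=
  let cp : Int := (c.toNat : Int)
  if 0x20 ≤ cp ∧ cp < 0x7F then Char.ofNat (cp + 0xE0000).toNat else c

-- recursive halves: encode(text[:mid]) + encode(text[mid:])
def pvEncList (l : List Char) : List Char :=
  match h : l with
  | [] => []
  | [c] => [pvEncChar c]
  | _ :: _ :: _ =>
    let mid := l.length / 2
    pvEncList (l.take mid) ++ pvEncList (l.drop mid)
termination_by l.length
decreasing_by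
  · subst h; simp [List.length_take]; omega
  · subst h; simp [List.length_drop]; omega

def encode_ascii_to_unicode_alt (text : String) : String :=
  String.mk (pvEncList text.toList)

-- ===== PRECONDITION & SPEC =====
def Spec_encode_ascii_to_unicode (text : String) (out : String) : Prop := out = encode_ascii_to_unicode_alt text
instance (text : String) (out : String) : Decidable (Spec_encode_ascii_to_unicode text out) := by unfold Spec_encode_ascii_to_unicode; infer_instance

-- ===== CLAIM (what is proved, stated in full; the proofs are below) =====
def Claim_equal_encode_ascii_to_unicode : Prop := ∀ (text : String), Dom_encode_ascii_to_unicode text → Spec_encode_ascii_to_unicode text (encode_ascii_to_unicode text)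

-- ===== LEMMAS AND PROOFS =====

lemma pvEncList_eq_map : ∀ l : List Char, pvEncList l = l.map pvEncChar := by
  intro l
  fun_induction pvEncList l with
  | case1 => rfl
  | case2 c => rfl
  | case3 a b rest mid ih1 ih2 =>
    show pvEncList (List.take mid (a :: b :: rest)) ++ pvEncList (List.drop mid (a :: b :: rest)) = _
    rw [ih1, ih2, ← List.map_append, List.take_append_drop]

lemma foldl_eq_map (l : List Char) (acc : List Char) :
    l.foldl (fun result char =>
      let code_point : Int := (char.toNat : Int)
      if 0x20 ≤ code_point ∧ code_point < 0x7F then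
        result ++ [Char.ofNat (code_point + 0xE0000).toNat]
      else
        result ++ [char]) acc = acc ++ l.map pvEncChar := by
  induction l generalizing acc with
  | nil => simp
  | cons c cs ih =>
    simp only [List.foldl_cons, List.map_cons]
    rw [ih]
    show (if 0x20 ≤ ((c.toNat : Int)) ∧ ((c.toNat : Int)) < 0x7F then
        acc ++ [Char.ofNat (((c.toNat : Int)) + 0xE0000).toNat] else acc ++ [c]) ++ cs.map pvEncChar = _
    unfold pvEncChar
    split_ifs with h
    · simp
      intro h1
      exfalso; omega
    · simp
      intro h1 h2
      exact absurd ⟨by exact_mod_cast h1, by exact_mod_cast h2⟩ h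

-- ===== VERDICT (by name: the statement is the Claim_ definition above) =====
theorem encode_ascii_to_unicode_spec : Claim_equal_encode_ascii_to_unicode := by
  intro text _
  unfold Spec_encode_ascii_to_unicode encode_ascii_to_unicode encode_ascii_to_unicode_alt
  rw [foldl_eq_map, pvEncList_eq_map]
  rfl
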